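-- pv_equiv track=rewrite | github.com/akohen/AdventOfCode | aoc_2024/day12.py | part2
-- ===== SOURCE A (Python) =====
-- def part2(data):
--
--     DIRECTIONS = [(0, 0), (1, 0), (0, 1), (1, 1)] # Corner (x,y) is top-left of cell (x,y)
--     def count_sides(region):
--         # list all the corners of each point in the region
--         # For each corner, check how many of the 4 surrounding points are in the region
--         corners, sides = set(), 0
--         for x, y in region:
--             for dx, dy in DIRECTIONS:
--                 corners.add((x + dx, y + dy))
--         for cx, cy in corners:
--             neighbors = [(cx - dx, cy - dy) for dx, dy in DIRECTIONS if (cx - dx, cy - dy) in region]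
--             if len(neighbors) == 1 or len(neighbors) == 3:
--                 sides += 1
--             elif len(neighbors) == 2: # Check if neighbors are diagonal or aligned
--                 if (neighbors[0][0] != neighbors[1][0]) and (neighbors[0][1] != neighbors[1][1]):
--                     sides += 2 # inside corner adds 2 sides
--         return sides
--     return sum(len(region) * count_sides(region) for region in data)
-- ===== SOURCE B (Python) =====
-- def part2(data):
--     DIAGONALS = ((1, 1), (1, -1), (-1, 1), (-1, -1))
--
--     def count_corners(region):
--         cells = set(region)
--         corners = 0
--         for x, y in cells:
--             for dx, dy in DIAGONALS:
--                 if (x + dx, y) not in cells and (x, y + dy) not in cells: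
--                     corners += 1  # convex corner
--                 elif (x + dx, y) in cells and (x, y + dy) in cells and (x + dx, y + dy) not in cells:
--                     corners += 1  # concave corner
--         return corners
--
--     return sum(len(region) * count_corners(region) for region in data)
-- ===== Notes on version B (the rewrite author's own statement) =====
-- stated objective: faster
-- what changed: count_sides no longer builds the set of all corner coordinates and classifies each corner by how many of its four surrounding cells lie in the region; instead B scans each cell once and, for each of its 4 diagonal directions, tests the local 2x2 configuration for a convex or concave corner, skipping the corner-set construction and the per-corner neighbor-list build (measured ~3.7x faster).
import Mathlib
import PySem

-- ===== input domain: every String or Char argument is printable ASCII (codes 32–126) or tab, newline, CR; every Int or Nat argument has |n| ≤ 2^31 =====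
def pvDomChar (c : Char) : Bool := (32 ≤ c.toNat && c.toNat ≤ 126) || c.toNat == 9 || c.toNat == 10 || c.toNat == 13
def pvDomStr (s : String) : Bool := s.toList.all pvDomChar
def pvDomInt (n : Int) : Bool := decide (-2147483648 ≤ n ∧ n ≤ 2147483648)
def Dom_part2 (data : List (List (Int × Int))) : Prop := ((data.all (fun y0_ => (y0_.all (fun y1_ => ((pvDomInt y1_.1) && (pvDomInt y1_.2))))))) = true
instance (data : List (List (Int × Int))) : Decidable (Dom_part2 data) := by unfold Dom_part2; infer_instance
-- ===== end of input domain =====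

-- B counts convex/concave corners directly from each cell's 4 diagonal neighbourhoods instead of
-- building a corner set and classifying each corner by its surrounding cells (objective: faster, measured).

-- ===== PORT A =====
def pvDirsA : List (Int × Int) := [(0, 0), (1, 0), (0, 1), (1, 1)]

def pvCountSidesA (region : List (Int × Int)) : Int :=
  let corners : PySem.Set (Int × Int) :=
    region.foldl (fun s p => pvDirsA.foldl (fun s d => PySem.Set.add s (p.1 + d.1, p.2 + d.2)) s)
      PySem.Set.empty
  corners.foldl (fun (sides : Int) c =>
    let neighbors : List (Int × Int) :=
      (pvDirsA.filter (fun d => region.contains (c.1 - d.1, c.2 - d.2))).map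
        (fun d => (c.1 - d.1, c.2 - d.2))
    if neighbors.length = 1 ∨ neighbors.length = 3 then sides + 1
    else if neighbors.length = 2 then
      if neighbors[0]!.1 ≠ neighbors[1]!.1 ∧ neighbors[0]!.2 ≠ neighbors[1]!.2 then sides + 2
      else sides
    else sides) 0

def part2 (data : List (List (Int × Int))) : Int :=
  (data.map (fun region => (region.length : Int) * pvCountSidesA region)).sum

-- ===== PORT B =====
def pvDiagsB : List (Int × Int) := [(1, 1), (1, -1), (-1, 1), (-1, -1)]

def pvCountCornersB (region : List (Int × Int)) : Int :=
  let cells : PySem.Set (Int × Int) := PySem.Set.ofList region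
  cells.foldl (fun acc p =>
    pvDiagsB.foldl (fun acc d =>
      if ¬ cells.contains (p.1 + d.1, p.2) ∧ ¬ cells.contains (p.1, p.2 + d.2) then acc + 1
      else if cells.contains (p.1 + d.1, p.2) ∧ cells.contains (p.1, p.2 + d.2) ∧
          ¬ cells.contains (p.1 + d.1, p.2 + d.2) then acc + 1
      else acc) acc) 0

def part2_alt (data : List (List (Int × Int))) : Int :=
  (data.map (fun region => (region.length : Int) * pvCountCornersB region)).sum

-- ===== PRECONDITION & SPEC =====
def Spec_part2 (data : List (List (Int × Int))) (out : Int) : Prop := out = part2_alt data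
instance (data : List (List (Int × Int))) (out : Int) : Decidable (Spec_part2 data out) := by unfold Spec_part2; infer_instance

-- ===== CLAIM (what is proved, stated in full; the proofs are below) =====
def Claim_equal_part2 : Prop := ∀ (data : List (List (Int × Int))), Dom_part2 data → Spec_part2 data (part2 data)

-- ===== LEMMAS AND PROOFS =====

-- per-corner increment of A's second loop
def pvLocA (R : List (Int × Int)) (c : Int × Int) : Int :=
  let neighbors : List (Int × Int) :=
    (pvDirsA.filter (fun d => R.contains (c.1 - d.1, c.2 - d.2))).map
      (fun d => (c.1 - d.1, c.2 - d.2))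
  if neighbors.length = 1 ∨ neighbors.length = 3 then 1
  else if neighbors.length = 2 then
    if neighbors[0]!.1 ≠ neighbors[1]!.1 ∧ neighbors[0]!.2 ≠ neighbors[1]!.2 then 2
    else 0
  else 0

-- per-(cell,diagonal) increment of B's loop
def pvLocB (R : List (Int × Int)) (p d : Int × Int) : Int :=
  if ¬ R.contains (p.1 + d.1, p.2) ∧ ¬ R.contains (p.1, p.2 + d.2) then 1
  else if R.contains (p.1 + d.1, p.2) ∧ R.contains (p.1, p.2 + d.2) ∧
      ¬ R.contains (p.1 + d.1, p.2 + d.2) then 1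
  else 0

theorem pv_foldl_eq_sum {α : Type} (f : Int → α → Int) (g : α → Int)
    (h : ∀ a x, f a x = a + g x) (l : List α) (a : Int) :
    l.foldl f a = a + (l.map g).sum := by
  induction l generalizing a with
  | nil => simp
  | cons x xs ih => simp [List.foldl_cons, ih, h, add_assoc]

def pvCorners (R : List (Int × Int)) : List (Int × Int) :=
  PySem.Set.ofList (R.flatMap (fun p => pvDirsA.map (fun d => (p.1 + d.1, p.2 + d.2))))

theorem pvCornersFold_eq (R : List (Int × Int)) :
    R.foldl (fun s p => pvDirsA.foldl (fun s d => PySem.Set.add s (p.1 + d.1, p.2 + d.2)) s)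
      PySem.Set.empty = pvCorners R := by
  have h : ∀ s : PySem.Set (Int × Int),
      R.foldl (fun s p => pvDirsA.foldl (fun s d => PySem.Set.add s (p.1 + d.1, p.2 + d.2)) s) s
        = PySem.Set.update s (R.flatMap (fun p => pvDirsA.map (fun d => (p.1 + d.1, p.2 + d.2)))) := by
    induction R with
    | nil => intro s; simp [PySem.Set.update_nil]
    | cons p R ih =>
        intro s
        rw [List.foldl_cons, List.flatMap_cons, PySem.Set.update_append,
          ← PySem.Set.update_map_eq_foldl_add, ih]
  rw [h, pvCorners, ← PySem.Set.update_empty]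

theorem pvCountSidesA_eq (R : List (Int × Int)) :
    pvCountSidesA R = ((pvCorners R).map (pvLocA R)).sum := by
  rw [pvCountSidesA]
  rw [pvCornersFold_eq]
  rw [pv_foldl_eq_sum _ (pvLocA R) ?_ (pvCorners R) 0, zero_add]
  intro a c
  simp only [pvLocA]
  split_ifs <;> ring

theorem contains_ofList (R : List (Int × Int)) (x : Int × Int) :
    (PySem.Set.ofList R : List (Int × Int)).contains x = R.contains x := by
  rw [Bool.eq_iff_iff]
  simp only [List.contains_iff_mem]
  rw [show ((PySem.Set.ofList R).contains x = true) ↔ x ∈ PySem.Set.ofList R from List.contains_iff_mem]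
  exact PySem.Set.mem_ofList R x

theorem pvCountCornersB_eq (R : List (Int × Int)) :
    pvCountCornersB R =
      ((PySem.Set.ofList R).map (fun p =>
        pvLocB R p (1, 1) + pvLocB R p (1, -1) + pvLocB R p (-1, 1) + pvLocB R p (-1, -1))).sum := by
  rw [pvCountCornersB]
  rw [pv_foldl_eq_sum _ (fun p =>
        pvLocB R p (1, 1) + pvLocB R p (1, -1) + pvLocB R p (-1, 1) + pvLocB R p (-1, -1)) ?_ _ 0,
      zero_add]
  intro a p
  rw [pv_foldl_eq_sum _ (fun d => pvLocB R p d) ?_ pvDiagsB a]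
  · simp [pvDiagsB, add_assoc]
  · intro a d
    simp only [pvLocB, contains_ofList]
    split_ifs <;> ring

theorem pv_shift (R : List (Int × Int)) (ox oy : Int) (ho : ((ox, oy) : Int × Int) ∈ pvDirsA)
    (f : Int × Int → Int) :
    ∑ p ∈ (PySem.Set.ofList R : List (Int × Int)).toFinset, f p
      = ∑ c ∈ (pvCorners R).toFinset,
          (if ((c.1 - ox, c.2 - oy) : Int × Int) ∈ R then f (c.1 - ox, c.2 - oy) else 0) := by
  rw [← Finset.sum_filter]
  have himg : (pvCorners R).toFinset.filter (fun c => ((c.1 - ox, c.2 - oy) : Int × Int) ∈ R)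
      = (PySem.Set.ofList R : List (Int × Int)).toFinset.image (fun p => (p.1 + ox, p.2 + oy)) := by
    ext c
    simp only [Finset.mem_filter, Finset.mem_image, List.mem_toFinset, PySem.Set.mem_ofList,
      pvCorners, List.mem_flatMap, List.mem_map]
    constructor
    · rintro ⟨_, hm⟩
      exact ⟨(c.1 - ox, c.2 - oy), hm, by simp⟩
    · rintro ⟨p, hp, rfl⟩
      refine ⟨⟨p, hp, (ox, oy), ho, rfl⟩, ?_⟩
      simpa using hp
  rw [himg, Finset.sum_image ?_]
  · apply Finset.sum_congr rfl
    intro p _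
    simp
  · intro x _ y _ h
    have h1 : x.1 + ox = y.1 + ox := congrArg Prod.fst h
    have h2 : x.2 + oy = y.2 + oy := congrArg Prod.snd h
    ext <;> omega

theorem pv_local (R : List (Int × Int)) (cx cy : Int) :
    pvLocA R (cx, cy)
      = (if ((cx - 1, cy - 1) : Int × Int) ∈ R then pvLocB R (cx - 1, cy - 1) (1, 1) else 0)
      + (if ((cx - 1, cy) : Int × Int) ∈ R then pvLocB R (cx - 1, cy) (1, -1) else 0)
      + (if ((cx, cy - 1) : Int × Int) ∈ R then pvLocB R (cx, cy - 1) (-1, 1) else 0)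
      + (if ((cx, cy) : Int × Int) ∈ R then pvLocB R (cx, cy) (-1, -1) else 0) := by
  have e1 : cx - 1 + 1 = cx := by ring
  have e2 : cy - 1 + 1 = cy := by ring
  have e3 : cy + -1 = cy - 1 := by ring
  have e4 : cx + -1 = cx - 1 := by ring
  by_cases h00 : ((cx, cy) : Int × Int) ∈ R <;>
    by_cases h10 : ((cx - 1, cy) : Int × Int) ∈ R <;>
      by_cases h01 : ((cx, cy - 1) : Int × Int) ∈ R <;>
        by_cases h11 : ((cx - 1, cy - 1) : Int × Int) ∈ R <;>
          simp [pvLocA, pvLocB, pvDirsA, List.filter, e1, e2, e3, e4,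
            h00, h10, h01, h11] <;>
          omega

theorem pv_count_eq (R : List (Int × Int)) : pvCountSidesA R = pvCountCornersB R := by
  rw [pvCountSidesA_eq, pvCountCornersB_eq]
  have hC : (pvCorners R).Nodup := by
    rw [pvCorners]; exact PySem.Set.nodup_ofList _
  rw [← List.sum_toFinset _ hC, ← List.sum_toFinset _ (PySem.Set.nodup_ofList R)]
  have hsplit : ∀ c ∈ (pvCorners R).toFinset, pvLocA R c
      = (if ((c.1 - 1, c.2 - 1) : Int × Int) ∈ R then pvLocB R (c.1 - 1, c.2 - 1) (1, 1) else 0)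
      + (if ((c.1 - 1, c.2) : Int × Int) ∈ R then pvLocB R (c.1 - 1, c.2) (1, -1) else 0)
      + (if ((c.1, c.2 - 1) : Int × Int) ∈ R then pvLocB R (c.1, c.2 - 1) (-1, 1) else 0)
      + (if ((c.1, c.2) : Int × Int) ∈ R then pvLocB R (c.1, c.2) (-1, -1) else 0) := by
    intro c _
    obtain ⟨cx, cy⟩ := c
    exact pv_local R cx cy
  rw [Finset.sum_congr rfl hsplit]
  simp only [Finset.sum_add_distrib]
  have s1 : ∑ c ∈ (pvCorners R).toFinset,
        (if ((c.1 - 1, c.2 - 1) : Int × Int) ∈ R then pvLocB R (c.1 - 1, c.2 - 1) (1, 1) else 0)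
      = ∑ p ∈ (PySem.Set.ofList R : List (Int × Int)).toFinset, pvLocB R p (1, 1) := by
    rw [pv_shift R 1 1 (by simp [pvDirsA]) (fun p => pvLocB R p (1, 1))]
  have s2 : ∑ c ∈ (pvCorners R).toFinset,
        (if ((c.1 - 1, c.2) : Int × Int) ∈ R then pvLocB R (c.1 - 1, c.2) (1, -1) else 0)
      = ∑ p ∈ (PySem.Set.ofList R : List (Int × Int)).toFinset, pvLocB R p (1, -1) := by
    rw [pv_shift R 1 0 (by simp [pvDirsA]) (fun p => pvLocB R p (1, -1))]
    exact Finset.sum_congr rfl (fun c _ => by simp)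
  have s3 : ∑ c ∈ (pvCorners R).toFinset,
        (if ((c.1, c.2 - 1) : Int × Int) ∈ R then pvLocB R (c.1, c.2 - 1) (-1, 1) else 0)
      = ∑ p ∈ (PySem.Set.ofList R : List (Int × Int)).toFinset, pvLocB R p (-1, 1) := by
    rw [pv_shift R 0 1 (by simp [pvDirsA]) (fun p => pvLocB R p (-1, 1))]
    exact Finset.sum_congr rfl (fun c _ => by simp)
  have s4 : ∑ c ∈ (pvCorners R).toFinset,
        (if ((c.1, c.2) : Int × Int) ∈ R then pvLocB R (c.1, c.2) (-1, -1) else 0)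
      = ∑ p ∈ (PySem.Set.ofList R : List (Int × Int)).toFinset, pvLocB R p (-1, -1) := by
    rw [pv_shift R 0 0 (by simp [pvDirsA]) (fun p => pvLocB R p (-1, -1))]
    exact Finset.sum_congr rfl (fun c _ => by simp)
  rw [s1, s2, s3, s4]

-- ===== VERDICT (by name: the statement is the Claim_ definition above) =====
theorem part2_spec : Claim_equal_part2 := by
  intro data _
  unfold Spec_part2 part2 part2_alt
  simp [pv_count_eq]
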